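-- pv_equiv track=rewrite | github.com/wallawaz/torrent_automator | models/fetcher.py | _check_archive
-- ===== SOURCE A (Python) =====
-- from string import digits
--
-- def _check_archive(file_tree):
--     def _min_part(min_file, min_part, filename):
--         requires = ["rar", "zip", "7z"]
--         filetype = filename.split(".")[-1].lower()
--         if filetype in requires:
--             return (filename, -1)
--
--         fn = "".join([f for f in filetype if f in digits])
--         if fn:
--             fn = int(fn)
--             if min_file is None or fn < min_part:
--                 min_file = filename
--                 min_part = fn
--         return (min_file, min_part)
--
--     min_file = None
--     min_part = None
--     for filename in file_tree.keys():
--         min_file, min_part = _min_part(min_file, min_part, filename)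
--         if min_part is not None and min_part < 0:
--             return filename
--
--     return min_file
-- ===== SOURCE B (Python) =====
-- from string import digits
--
--
-- def _check_archive(file_tree):
--     def _ext(filename):
--         return filename.split(".")[-1].lower()
--
--     # Pass 1: a full archive file anywhere wins immediately (first one in order).
--     for filename in file_tree.keys():
--         if _ext(filename) in ("rar", "zip", "7z"):
--             return filename
--
--     # Pass 2: otherwise keep the filename with the strictly smallest part number
--     # (digits of the extension); first occurrence wins ties.
--     best = None
--     for filename in file_tree.keys():
--         ds = "".join(c for c in _ext(filename) if c in digits)
--         if ds:
--             n = int(ds)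
--             if best is None or n < best[0]:
--                 best = (n, filename)
--     return best[1] if best is not None else None
-- ===== Notes on version B (the rewrite author's own statement) =====
-- stated objective: simpler
-- what changed: Replaces A's single fused loop threading a (min_file, min_part) pair with a -1 sentinel through a nested helper by two plain passes: first a direct scan returning the first archive-extension file, then an independent minimum scan over part numbers.
import Mathlib
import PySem

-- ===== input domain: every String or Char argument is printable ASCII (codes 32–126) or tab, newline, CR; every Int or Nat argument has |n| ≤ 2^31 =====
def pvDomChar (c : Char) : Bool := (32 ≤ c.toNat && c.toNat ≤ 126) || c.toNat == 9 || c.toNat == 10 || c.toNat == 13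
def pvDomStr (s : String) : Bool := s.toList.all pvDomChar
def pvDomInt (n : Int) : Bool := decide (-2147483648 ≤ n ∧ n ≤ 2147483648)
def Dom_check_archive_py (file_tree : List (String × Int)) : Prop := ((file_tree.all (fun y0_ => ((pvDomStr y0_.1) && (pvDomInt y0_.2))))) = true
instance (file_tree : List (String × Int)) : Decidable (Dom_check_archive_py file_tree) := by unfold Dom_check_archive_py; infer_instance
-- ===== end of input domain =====

-- B replaces A's single fused loop (threading a (min_file, min_part) pair with a -1 archive
-- sentinel) by two independent passes: find the first archive file, else the minimum part number.

-- ===== PORT A =====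
-- filetype = filename.split(".")[-1].lower()
def aFiletype (filename : String) : List Char :=
  PySem.Chars.lower ((PySem.List.pyGet? (PySem.Chars.splitOn filename.toList ['.']) (-1)).getD [])

-- the nested helper _min_part(min_file, min_part, filename)
def aMinPart (min_file : Option String) (min_part : Option Int) (filename : String) :
    Option String × Option Int :=
  let filetype := aFiletype filename
  if filetype ∈ [['r','a','r'], ['z','i','p'], ['7','z']] then
    (some filename, some (-1))
  else
    let fn := filetype.filter PySem.Chars.isdigit
    if fn ≠ [] then
      let n := (PySem.Int.ofChars? fn).getD 0   -- int(fn); fn is a nonempty digit string, so never none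
      if min_file = none then (some filename, some n)
      else if n < min_part.getD 0 then (some filename, some n)
      else (min_file, min_part)
    else (min_file, min_part)

-- the 'for filename in file_tree.keys()' loop with its early return
def aLoop : List (String × Int) → Option String → Option Int → Option String
  | [], min_file, _ => min_file
  | (filename, _) :: rest, min_file, min_part =>
    let st := aMinPart min_file min_part filename
    if st.2 ≠ none ∧ st.2.getD 0 < 0 then some filename
    else aLoop rest st.1 st.2

def check_archive_py (file_tree : List (String × Int)) : Option String :=
  aLoop file_tree none none

-- ===== PORT B =====
-- _ext(filename) = filename.split(".")[-1].lower()
def bExt (filename : String) : List Char :=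
  PySem.Chars.lower ((PySem.List.pyGet? (PySem.Chars.splitOn filename.toList ['.']) (-1)).getD [])

-- pass 2 body: fold keeping best = (part, filename) with strictly smaller part
def bStep (best : Option (Int × String)) (kv : String × Int) : Option (Int × String) :=
  let ds := (bExt kv.1).filter PySem.Chars.isdigit
  if ds ≠ [] then
    let n := (PySem.Int.ofChars? ds).getD 0
    match best with
    | none => some (n, kv.1)
    | some (p, f) => if n < p then some (n, kv.1) else some (p, f)
  else best

def check_archive_py_alt (file_tree : List (String × Int)) : Option String :=
  match file_tree.find? (fun kv => decide (bExt kv.1 ∈ [['r','a','r'], ['z','i','p'], ['7','z']])) with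
  | some kv => some kv.1
  | none => (file_tree.foldl bStep none).map (·.2)

-- ===== PRECONDITION & SPEC =====
def Spec_check_archive_py (file_tree : List (String × Int)) (out : Option String) : Prop := out = check_archive_py_alt file_tree
instance (file_tree : List (String × Int)) (out : Option String) : Decidable (Spec_check_archive_py file_tree out) := by unfold Spec_check_archive_py; infer_instance

-- ===== CLAIM (what is proved, stated in full; the proofs are below) =====
def Claim_equal_check_archive_py : Prop := ∀ (file_tree : List (String × Int)), Dom_check_archive_py file_tree → Spec_check_archive_py file_tree (check_archive_py file_tree)

-- ===== LEMMAS AND PROOFS =====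

lemma digit_not_space {c : Char} (h : PySem.Chars.isdigit c = true) : PySem.Int.isIntSpace c = false := by
  simp only [PySem.Chars.isdigit, Bool.and_eq_true, decide_eq_true_eq] at h
  simp only [PySem.Int.isIntSpace, Bool.or_eq_false_iff, decide_eq_false_iff_not]
  obtain ⟨h1, h2⟩ := h
  refine ⟨⟨⟨⟨⟨?_,?_⟩,?_⟩,?_⟩,?_⟩,?_⟩ <;> rintro rfl <;> simp [Char.le_def] at h1 h2

lemma map_id_bind_nonneg (o : Option Nat) :
    0 ≤ ((Option.map (fun n => n) (do let a ← o; pure ((a : Int)))).getD 0) := by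
  cases o <;> simp

lemma dropWhile_space_digits {cs : List Char} (h : cs.all PySem.Chars.isdigit) :
    cs.dropWhile PySem.Int.isIntSpace = cs := by
  cases cs with
  | nil => rfl
  | cons c t =>
    simp only [List.all_cons, Bool.and_eq_true] at h
    simp [digit_not_space h.1]

-- int(s) of an all-digit string is never negative
lemma ofChars?_digits_nonneg {cs : List Char} (h : cs.all PySem.Chars.isdigit) :
    0 ≤ (PySem.Int.ofChars? cs).getD 0 := by
  unfold PySem.Int.ofChars?
  have h2 : (cs.reverse.dropWhile PySem.Int.isIntSpace) = cs.reverse := by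
    apply dropWhile_space_digits; simpa using h
  rw [dropWhile_space_digits h, h2, List.reverse_reverse]
  simp only []
  split
  all_goals first
    | exact map_id_bind_nonneg _
    | simp [PySem.Chars.isdigit] at h

lemma filter_digits_all (l : List Char) :
    (l.filter PySem.Chars.isdigit).all PySem.Chars.isdigit = true := by
  rw [List.all_eq_true]
  intro c hc
  exact (List.mem_filter.mp hc).2

lemma partVal_nonneg (l : List Char) :
    0 ≤ (PySem.Int.ofChars? (l.filter PySem.Chars.isdigit)).getD 0 :=
  ofChars?_digits_nonneg (filter_digits_all l)

-- the state correspondence: A's fused loop, started at the projections of B's accumulator,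
-- computes "first archive, else result of B's fold"
lemma aLoop_eq (ft : List (String × Int)) (best : Option (Int × String))
    (hb : ∀ p f, best = some (p, f) → 0 ≤ p) :
    aLoop ft (best.map (·.2)) (best.map (·.1)) =
      match ft.find? (fun kv => decide (bExt kv.1 ∈ [['r','a','r'], ['z','i','p'], ['7','z']])) with
      | some kv => some kv.1
      | none => (ft.foldl bStep best).map (·.2) := by
  induction ft generalizing best with
  | nil => cases best <;> rfl
  | cons kv rest ih =>
    obtain ⟨f, v⟩ := kv
    have hA : aFiletype f = bExt f := rfl
    by_cases harch : bExt f ∈ [['r','a','r'], ['z','i','p'], ['7','z']]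
    · rw [List.find?_cons_of_pos (by simpa using harch)]
      have hst : aMinPart (best.map (·.2)) (best.map (·.1)) f = (some f, some (-1)) := by
        simp [aMinPart, hA, harch]
      simp [aLoop, hst]
    · rw [List.find?_cons_of_neg (by simpa using harch), List.foldl_cons]
      have step : ∀ best' : Option (Int × String),
          bStep best (f, v) = best' →
          aMinPart (best.map (·.2)) (best.map (·.1)) f = (best'.map (·.2), best'.map (·.1)) →
          (∀ p g, best' = some (p, g) → 0 ≤ p) →
          aLoop ((f, v) :: rest) (best.map (·.2)) (best.map (·.1)) =
            match rest.find? (fun kv => decide (bExt kv.1 ∈ [['r','a','r'], ['z','i','p'], ['7','z']])) with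
            | some kv => some kv.1
            | none => ((rest.foldl bStep (bStep best (f, v))).map (·.2)) := by
        intro best' hbs hst hb'
        have hno : ¬ ((best'.map (·.1) : Option Int) ≠ none ∧ (best'.map (·.1)).getD 0 < 0) := by
          rcases best' with _ | ⟨p, g⟩
          · simp
          · have := hb' p g rfl
            simp
            omega
        simp only [aLoop, hst]
        rw [if_neg hno, hbs]
        exact ih best' hb'
      by_cases hds : (bExt f).filter PySem.Chars.isdigit = []
      · exact step best (by simp [bStep, hds]) (by simp [aMinPart, hA, harch, hds]) hb
      · have hn0 : 0 ≤ (PySem.Int.ofChars? ((bExt f).filter PySem.Chars.isdigit)).getD 0 :=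
          partVal_nonneg _
        rcases best with _ | ⟨p, f0⟩
        · exact step (some ((PySem.Int.ofChars? ((bExt f).filter PySem.Chars.isdigit)).getD 0, f))
            (by simp [bStep, hds]) (by simp [aMinPart, hA, harch, hds])
            (by rintro p' g ⟨rfl, rfl⟩; exact hn0)
        · have hp0 : 0 ≤ p := hb p f0 rfl
          by_cases hlt : (PySem.Int.ofChars? ((bExt f).filter PySem.Chars.isdigit)).getD 0 < p
          · exact step (some ((PySem.Int.ofChars? ((bExt f).filter PySem.Chars.isdigit)).getD 0, f))
              (by simp [bStep, hds, hlt]) (by simp [aMinPart, hA, harch, hds, hlt])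
              (by rintro p' g ⟨rfl, rfl⟩; exact hn0)
          · exact step (some (p, f0))
              (by simp [bStep, hds, hlt]) (by simp [aMinPart, hA, harch, hds, hlt])
              (by rintro p' g ⟨rfl, rfl⟩; exact hp0)

-- ===== VERDICT (by name: the statement is the Claim_ definition above) =====
theorem check_archive_py_spec : Claim_equal_check_archive_py := by
  intro ft _
  unfold Spec_check_archive_py check_archive_py check_archive_py_alt
  exact aLoop_eq ft none (by simp)
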